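-- pv_equiv track=rewrite | github.com/bitwisecook/tcl-lsp | core/minifier/static_substr.py | _build_replacement
-- ===== SOURCE A (Python) =====
-- def _braces_balanced(text: str) -> bool:
--     """Return True if braces in *text* are properly nested (depth never goes negative)."""
--     depth = 0
--     for ch in text:
--         if ch == "{":
--             depth += 1
--         elif ch == "}":
--             depth -= 1
--             if depth < 0:
--                 return False
--     return depth == 0
--
-- def _build_replacement(folded: str) -> str:
--     """Build a replacement token for a folded static string.
--
--     Prefers brace quoting when safe.  Falls back to double-quote form
--     with proper escaping of Tcl metacharacters.
--     """
--     needs_quoting = not folded or any(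
--         ch in folded for ch in (" ", "\t", "\n", '"', "{", "}", "[", "]", "$", "\\", ";")
--     )
--
--     if not needs_quoting:
--         return folded
--
--     # Brace-quoting: safe when braces are properly nested and no backslash.
--     if "\\" not in folded and _braces_balanced(folded):
--         return "{" + folded + "}"
--
--     # Double-quote form with escaping.
--     escaped = folded.replace("\\", "\\\\").replace('"', '\\"')
--     escaped = escaped.replace("$", "\\$").replace("[", "\\[")
--     return '"' + escaped + '"'
-- ===== SOURCE B (Python) =====
-- def _build_replacement(folded: str) -> str:
--     """Build a replacement token for a folded static string.
--
--     Single pass over the string: tracks brace depth, a negative-depth flag,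
--     a backslash flag and a needs-quoting flag at once, then emits.
--     """
--     depth = 0
--     neg = False
--     has_backslash = False
--     needs_quoting = False
--     for ch in folded:
--         if ch in ' \t\n"{}[]$\\;':
--             needs_quoting = True
--         if ch == "\\":
--             has_backslash = True
--         elif ch == "{":
--             depth += 1
--         elif ch == "}":
--             depth -= 1
--             if depth < 0:
--                 neg = True
--     if not folded:
--         needs_quoting = True
--
--     if not needs_quoting:
--         return folded
--
--     if not has_backslash and not neg and depth == 0:
--         return "{" + folded + "}"
--
--     escaped = folded.replace("\\", "\\\\").replace('"', '\\"')
--     escaped = escaped.replace("$", "\\$").replace("[", "\\[")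
--     return '"' + escaped + '"'
-- ===== Notes on version B (the rewrite author's own statement) =====
-- stated objective: alternative
-- what changed: Replaces A's three separate scans (an any() over eleven substring-membership tests, the _braces_balanced helper loop, and a backslash membership test) with one fused loop that tracks brace depth, a negative-depth flag, a backslash flag and a needs-quoting flag simultaneously; the escaping substitutions are kept identical.
import Mathlib
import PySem

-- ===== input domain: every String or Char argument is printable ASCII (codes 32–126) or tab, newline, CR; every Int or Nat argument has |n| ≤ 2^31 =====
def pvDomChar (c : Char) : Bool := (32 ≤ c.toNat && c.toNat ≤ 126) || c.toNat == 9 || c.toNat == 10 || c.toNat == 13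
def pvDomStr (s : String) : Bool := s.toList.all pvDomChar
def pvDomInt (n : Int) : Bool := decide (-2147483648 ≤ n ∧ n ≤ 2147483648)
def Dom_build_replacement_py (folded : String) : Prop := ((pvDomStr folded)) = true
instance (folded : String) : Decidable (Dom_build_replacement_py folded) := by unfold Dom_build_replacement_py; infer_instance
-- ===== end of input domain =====

-- B fuses A's three separate scans (any() over eleven membership tests, the _braces_balanced
-- helper, and a backslash test) into one loop tracking depth/neg/backslash/needs-quoting;
-- same escaping substitutions, same output (objective: alternative).


-- ===== PORT A =====
-- the tuple of special characters in A's any(...) generator, in source order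
def pvSpecialsA : List Char := [' ', '\t', '\n', '"', '{', '}', '[', ']', '$', '\\', ';']

-- _braces_balanced: loop over text with depth, early return False when depth < 0
def pvBracesGo : List Char → Int → Bool
  | [], depth => depth == 0
  | ch :: rest, depth =>
    if ch = '{' then pvBracesGo rest (depth + 1)
    else if ch = '}' then
      if depth - 1 < 0 then false else pvBracesGo rest (depth - 1)
    else pvBracesGo rest depth

def build_replacement_py (folded : String) : String :=
  -- not folded or any(ch in folded for ch in (...))
  let needs_quoting := folded.toList.isEmpty ||
    pvSpecialsA.any (fun ch => PySem.Str.isIn (String.ofList [ch]) folded)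
  if !needs_quoting then folded
  else if !(PySem.Str.isIn "\\" folded) && pvBracesGo folded.toList 0 then
    -- "{" + folded + "}"  (string concatenation, exact on code points)
    String.ofList ('{' :: folded.toList ++ ['}'])
  else
    let escaped := PySem.Str.replace (PySem.Str.replace (PySem.Str.replace
      (PySem.Str.replace folded "\\" "\\\\") "\"" "\\\"") "$" "\\$") "[" "\\["
    String.ofList ('"' :: escaped.toList ++ ['"'])

-- ===== PORT B =====
-- the membership string B tests each character against
def pvSpecialsB : List Char := (" \t\n\"{}[]$\\;" : String).toList

-- one fused loop step over state (depth, neg, has_backslash, needs_quoting)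
def pvStepB (s : Int × Bool × Bool × Bool) (ch : Char) : Int × Bool × Bool × Bool :=
  let nq := s.2.2.2 || decide (ch ∈ pvSpecialsB)
  if ch = '\\' then (s.1, s.2.1, true, nq)
  else if ch = '{' then (s.1 + 1, s.2.1, s.2.2.1, nq)
  else if ch = '}' then (s.1 - 1, s.2.1 || decide (s.1 - 1 < 0), s.2.2.1, nq)
  else (s.1, s.2.1, s.2.2.1, nq)

def build_replacement_py_alt (folded : String) : String :=
  let r := folded.toList.foldl pvStepB (0, false, false, false)
  let needs_quoting := r.2.2.2 || folded.toList.isEmpty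
  if !needs_quoting then folded
  else if !r.2.2.1 && !r.2.1 && r.1 == 0 then
    String.ofList ('{' :: folded.toList ++ ['}'])
  else
    let escaped := PySem.Str.replace (PySem.Str.replace (PySem.Str.replace
      (PySem.Str.replace folded "\\" "\\\\") "\"" "\\\"") "$" "\\$") "[" "\\["
    String.ofList ('"' :: escaped.toList ++ ['"'])

-- ===== PRECONDITION & SPEC =====
def Spec_build_replacement_py (folded : String) (out : String) : Prop := out = build_replacement_py_alt folded
instance (folded : String) (out : String) : Decidable (Spec_build_replacement_py folded out) := by unfold Spec_build_replacement_py; infer_instance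

-- ===== CLAIM (what is proved, stated in full; the proofs are below) =====
def Claim_equal_build_replacement_py : Prop := ∀ (folded : String), Dom_build_replacement_py folded → Spec_build_replacement_py folded (build_replacement_py folded)

-- ===== LEMMAS AND PROOFS =====

-- depth/neg components of B's fused fold, in isolation
def pvDStep (p : Int × Bool) (ch : Char) : Int × Bool :=
  if ch = '\\' then p
  else if ch = '{' then (p.1 + 1, p.2)
  else if ch = '}' then (p.1 - 1, p.2 || decide (p.1 - 1 < 0))
  else p

lemma pvStepB_proj (l : List Char) : ∀ (d : Int) (neg bs nq : Bool),
    l.foldl pvStepB (d, neg, bs, nq) =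
      ((l.foldl pvDStep (d, neg)).1, ((l.foldl pvDStep (d, neg)).2,
        (bs || l.any (· == '\\'), nq || l.any (fun c => decide (c ∈ pvSpecialsB))))) := by
  induction l with
  | nil => intro d neg bs nq; simp
  | cons c rest ih =>
    intro d neg bs nq
    simp only [List.foldl_cons, List.any_cons]
    by_cases h1 : c = '\\'
    · subst h1
      simp [pvStepB, pvDStep, ih, pvSpecialsB]
    · by_cases h2 : c = '{'
      · subst h2
        simp [pvStepB, pvDStep, ih, pvSpecialsB]
      · by_cases h3 : c = '}'
        · subst h3
          simp [pvStepB, pvDStep, ih, pvSpecialsB]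
        · have hb : (c == '\\') = false := by simp [h1]
          simp [pvStepB, pvDStep, h1, h2, h3, ih, Bool.or_assoc, hb]

lemma pvDStep_neg_persist (l : List Char) : ∀ (d : Int),
    (l.foldl pvDStep (d, true)).2 = true := by
  induction l with
  | nil => intro d; rfl
  | cons c rest ih =>
    intro d
    simp only [List.foldl_cons, pvDStep]
    split_ifs <;> simp [ih]

-- A's early-return brace loop equals B's (depth, neg-flag) fold
lemma pvBracesGo_eq (l : List Char) : ∀ (d : Int),
    pvBracesGo l d = (!(l.foldl pvDStep (d, false)).2 && ((l.foldl pvDStep (d, false)).1 == 0)) := by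
  induction l with
  | nil => intro d; simp [pvBracesGo]
  | cons c rest ih =>
    intro d
    simp only [List.foldl_cons, pvBracesGo, pvDStep]
    by_cases h2 : c = '{'
    · simp [h2, ih, show ¬ ('{' = '\\') by decide]
    · by_cases h3 : c = '}'
      · subst h3
        by_cases hd : d - 1 < 0
        · simp [h2, hd, show ¬ ('}' = '\\') by decide, pvDStep_neg_persist]
        · simp [h2, hd, ih, show ¬ ('}' = '\\') by decide]
      · by_cases h1 : c = '\\'
        · simp [h1, ih]
        · simp [h1, h2, h3, ih]

lemma pv_infix_singleton (c : Char) (l : List Char) : ([c] <:+: l) ↔ c ∈ l := by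
  constructor
  · rintro ⟨s, t, rfl⟩; simp
  · intro h
    obtain ⟨s, t, rfl⟩ := List.append_of_mem h
    exact ⟨s, t, by simp⟩

lemma pv_isIn_backslash (s : String) :
    PySem.Str.isIn "\\" s = s.toList.any (· == '\\') := by
  rw [Bool.eq_iff_iff, PySem.Str.isIn_iff_infix]
  have h : ("\\" : String).toList = ['\\'] := rfl
  rw [h]
  simp [pv_infix_singleton]

lemma pv_isIn_single (c : Char) (s : String) :
    PySem.Str.isIn (String.ofList [c]) s = s.toList.any (· == c) := by
  rw [Bool.eq_iff_iff, PySem.Str.isIn_iff_infix]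
  simp [pv_infix_singleton]

-- the any-over-specials scan equals the per-character membership scan
lemma pv_any_comm (l : List Char) :
    pvSpecialsA.any (fun ch => l.any (· == ch)) =
      l.any (fun c => decide (c ∈ pvSpecialsB)) := by
  have hS : pvSpecialsB = pvSpecialsA := by decide
  rw [Bool.eq_iff_iff, hS]
  simp only [List.any_eq_true, beq_iff_eq, decide_eq_true_eq]
  constructor
  · rintro ⟨ch, hch, c, hc, rfl⟩; exact ⟨c, hc, hch⟩
  · rintro ⟨c, hc, hmem⟩; exact ⟨c, hmem, c, hc, rfl⟩

-- ===== VERDICT (by name: the statement is the Claim_ definition above) =====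
theorem build_replacement_py_spec : Claim_equal_build_replacement_py := by
  intro folded _
  unfold Spec_build_replacement_py build_replacement_py build_replacement_py_alt
  simp only [pvStepB_proj, pv_isIn_single, pv_any_comm, Bool.false_or,
    pvBracesGo_eq, pv_isIn_backslash, Bool.and_assoc]
  rw [Bool.or_comm]
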